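-- pv_equiv track=rewrite | github.com/CSEN-SCU/csen-174-s26-team-project-course-planner | project/course_planner/utils/scu_course_schedule_xlsx.py | expand_subjects_for_schedule_lookup
-- ===== SOURCE A (Python) =====
-- _SCHEDULE_SUBJECT_TYPOS: dict[str, str] = {"CSEE": "CSEN"}
--
-- def expand_subjects_for_schedule_lookup(subject_tokens: list[str]) -> list[str]:
--     out: list[str] = []
--     seen: set[str] = set()
--     for raw in subject_tokens:
--         u = raw.strip().upper()
--         if not u:
--             continue
--         for cand in (u, _SCHEDULE_SUBJECT_TYPOS.get(u, "")):
--             if cand and cand not in seen: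
--                 out.append(cand)
--                 seen.add(cand)
--     return out
-- ===== SOURCE B (Python) =====
-- _SCHEDULE_SUBJECT_TYPOS: dict[str, str] = {"CSEE": "CSEN"}
--
-- def expand_subjects_for_schedule_lookup(subject_tokens: list[str]) -> list[str]:
--     # Back-to-front construction: walk the tokens in reverse, prepending each
--     # token's expansion and filtering its entries out of the suffix result.
--     # Earlier tokens are prepended later, so first occurrences win; no seen-set
--     # and no final dedup pass are needed.
--     result: list[str] = []
--     for raw in reversed(subject_tokens):
--         u = raw.strip().upper()
--         if not u:
--             continue
--         if u in _SCHEDULE_SUBJECT_TYPOS: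
--             head = [u, _SCHEDULE_SUBJECT_TYPOS[u]]
--         else:
--             head = [u]
--         result = head + [x for x in result if x not in head]
--     return result
-- ===== Notes on version B (the rewrite author's own statement) =====
-- stated objective: alternative
-- what changed: Replaces A's forward pass that appends candidates while tracking a 'seen' membership set by a back-to-front construction: iterate the tokens in reverse, prepending each token's expansion and filtering its entries out of the suffix result, so first occurrences win with no seen-set and no dedup pass; trades the O(1)-lookup set for a filter over the (small, distinct-subject-bounded) running result.
import Mathlib
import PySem

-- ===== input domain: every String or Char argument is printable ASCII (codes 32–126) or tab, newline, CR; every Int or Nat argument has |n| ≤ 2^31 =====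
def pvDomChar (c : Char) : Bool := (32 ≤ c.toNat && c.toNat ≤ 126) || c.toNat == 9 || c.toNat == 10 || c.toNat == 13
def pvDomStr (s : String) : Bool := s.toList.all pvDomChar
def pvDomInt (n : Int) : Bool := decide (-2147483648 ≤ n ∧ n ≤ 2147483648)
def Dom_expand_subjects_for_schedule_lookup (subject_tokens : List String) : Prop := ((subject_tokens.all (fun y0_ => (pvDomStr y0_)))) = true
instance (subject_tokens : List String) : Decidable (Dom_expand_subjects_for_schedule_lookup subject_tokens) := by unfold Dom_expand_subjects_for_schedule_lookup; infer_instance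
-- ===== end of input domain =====

-- B replaces A's forward pass with a seen-set by a back-to-front construction: walking the
-- tokens in reverse, it prepends each token's expansion and filters those entries out of the
-- suffix result, so first occurrences win without any membership set or dedup pass.

-- ===== PORT A =====
-- _SCHEDULE_SUBJECT_TYPOS
def pvSchedTypos : PySem.Dict String String := PySem.Dict.ofList [("CSEE", "CSEN")]

-- body of A's inner 'for cand in (u, _SCHEDULE_SUBJECT_TYPOS.get(u, ""))' loop; state = (out, seen)
def pvAInner (st : List String × PySem.Set String) (cand : String) : List String × PySem.Set String :=
  if cand ≠ "" ∧ ¬ PySem.Set.contains st.2 cand then (st.1 ++ [cand], PySem.Set.add st.2 cand)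
  else st

-- body of A's outer 'for raw in subject_tokens' loop
def pvAOuter (st : List String × PySem.Set String) (raw : String) : List String × PySem.Set String :=
  let u := PySem.Str.upper (PySem.Str.strip raw)
  if u = "" then st
  else [u, PySem.Dict.getD pvSchedTypos u ""].foldl pvAInner st

def expand_subjects_for_schedule_lookup (subject_tokens : List String) : List String :=
  (subject_tokens.foldl pvAOuter ([], PySem.Set.empty)).1

-- ===== PORT B =====
-- body of B's 'for raw in reversed(subject_tokens)' loop; 'result' is the suffix result.
-- '_SCHEDULE_SUBJECT_TYPOS[u]' is ported as '(Dict.get? …).getD ""': exact here because it is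
-- evaluated only under the 'contains' guard, where get? is some.
def pvBStep (result : List String) (raw : String) : List String :=
  let u := PySem.Str.upper (PySem.Str.strip raw)
  if u = "" then result
  else
    let head := if PySem.Dict.contains pvSchedTypos u
                then [u, (PySem.Dict.get? pvSchedTypos u).getD ""]
                else [u]
    head ++ result.filter (fun x => !head.contains x)

def expand_subjects_for_schedule_lookup_alt (subject_tokens : List String) : List String :=
  subject_tokens.reverse.foldl pvBStep []

-- ===== PRECONDITION & SPEC =====
def Spec_expand_subjects_for_schedule_lookup (subject_tokens : List String) (out : List String) : Prop := out = expand_subjects_for_schedule_lookup_alt subject_tokens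
instance (subject_tokens : List String) (out : List String) : Decidable (Spec_expand_subjects_for_schedule_lookup subject_tokens out) := by unfold Spec_expand_subjects_for_schedule_lookup; infer_instance

-- ===== CLAIM (what is proved, stated in full; the proofs are below) =====
def Claim_equal_expand_subjects_for_schedule_lookup : Prop := ∀ (subject_tokens : List String), Dom_expand_subjects_for_schedule_lookup subject_tokens → Spec_expand_subjects_for_schedule_lookup subject_tokens (expand_subjects_for_schedule_lookup subject_tokens)

-- ===== LEMMAS AND PROOFS =====

-- the expansion one token contributes (proof-only helper)
def pvExpand (raw : String) : List String :=
  let u := PySem.Str.upper (PySem.Str.strip raw)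
  if u = "" then [] else if "CSEE" == u then [u, "CSEN"] else [u]

theorem pvTypos_eq : pvSchedTypos = PySem.Dict.mk [("CSEE", "CSEN")] := rfl

theorem pvTypos_contains (u : String) :
    PySem.Dict.contains pvSchedTypos u = ("CSEE" == u) := by
  rw [pvTypos_eq]; simp [PySem.Dict.contains]

theorem pvTypos_getD (u : String) :
    PySem.Dict.getD pvSchedTypos u "" = if "CSEE" == u then "CSEN" else "" := by
  rw [pvTypos_eq]; simp [PySem.Dict.getD, PySem.Dict.get?, List.find?]
  split <;> simp_all

theorem pvTypos_get?D (u : String) :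
    (PySem.Dict.get? pvSchedTypos u).getD "" = if "CSEE" == u then "CSEN" else "" := by
  rw [pvTypos_eq]; simp [PySem.Dict.get?, List.find?]
  split <;> simp_all

theorem pvExpand_nodup (raw : String) : (pvExpand raw).Nodup := by
  simp only [pvExpand]
  split_ifs with hu hk
  · simp
  · simp only [beq_iff_eq] at hk
    simp [← hk]
  · simp

-- A's inner step, when seen = out, is Set.add on both components (for a nonempty cand)
theorem pvAInner_eq_add (out : List String) (cand : String) (hc : cand ≠ "") :
    pvAInner (out, out) cand = (PySem.Set.add out cand, PySem.Set.add out cand) := by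
  by_cases h : cand ∈ out <;>
    simp [pvAInner, PySem.Set.add, PySem.Set.contains, h, hc]

-- A's outer step, when seen = out, performs Set.update with the token's expansion
theorem pvAOuter_eq_update (out : List String) (raw : String) :
    pvAOuter (out, out) raw = (PySem.Set.update out (pvExpand raw), PySem.Set.update out (pvExpand raw)) := by
  simp only [pvAOuter, pvExpand]
  split_ifs with hu hk
  · simp [PySem.Set.update]
  · simp only [List.foldl_cons, List.foldl_nil]
    rw [pvAInner_eq_add out _ hu, pvTypos_getD, if_pos hk, pvAInner_eq_add _ "CSEN" (by decide)]
    simp [PySem.Set.update]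
  · simp only [List.foldl_cons, List.foldl_nil]
    rw [pvAInner_eq_add out _ hu, pvTypos_getD, if_neg hk]
    simp [pvAInner, PySem.Set.update]

-- A's loop, started from a duplicated state, stays duplicated and performs Set.update
-- with the concatenated expansions of the tokens
theorem pvLoop_eq (ts : List String) (out : List String) :
    ts.foldl pvAOuter (out, out)
    = (PySem.Set.update out (ts.flatMap pvExpand), PySem.Set.update out (ts.flatMap pvExpand)) := by
  induction ts generalizing out with
  | nil => simp [PySem.Set.update]
  | cons raw rest ih =>
    simp only [List.foldl_cons, List.flatMap_cons, pvAOuter_eq_update, ih]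
    simp [PySem.Set.update, List.foldl_append]

-- B's step prepends the expansion and filters it out of the suffix result
theorem pvBStep_eq_merge (res : List String) (raw : String) :
    pvBStep res raw = pvExpand raw ++ res.filter (fun x => !(pvExpand raw).contains x) := by
  simp only [pvBStep, pvExpand, pvTypos_contains, pvTypos_get?D]
  split_ifs with hu hk
  · simp
  · simp
  · simp

-- updating a set with a duplicate-free batch E appends E's fresh elements in order
theorem pvUpdate_nodup (E : List String) (s : List String) (hE : E.Nodup) :
    PySem.Set.update s E = s ++ E.filter (fun x => !s.contains x) := by
  induction E generalizing s with
  | nil => simp [PySem.Set.update]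
  | cons e E ih =>
    rcases List.nodup_cons.1 hE with ⟨he, hE'⟩
    by_cases hs : e ∈ s
    · have : PySem.Set.add s e = s := by simp [PySem.Set.add, PySem.Set.contains, hs]
      simp only [PySem.Set.update, List.foldl_cons, this]
      rw [← PySem.Set.update]
      simp [ih s hE', hs]
    · have : PySem.Set.add s e = s ++ [e] := by simp [PySem.Set.add, PySem.Set.contains, hs]
      simp only [PySem.Set.update, List.foldl_cons, this]
      rw [← PySem.Set.update]
      rw [ih (s ++ [e]) hE']
      have hf : E.filter (fun x => !(s ++ [e]).contains x)
          = E.filter (fun x => !s.contains x) := by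
        apply List.filter_congr
        intro x hx
        have hxe : x ≠ e := fun h => he (h ▸ hx)
        simp [hxe]
      rw [hf]
      simp [hs]

-- the invariant tying B's back-to-front result to A's Set.update of the expansions
theorem pvKey (ts : List String) (s : List String) :
    PySem.Set.update s (ts.flatMap pvExpand)
      = s ++ (ts.foldr (fun raw res => pvExpand raw ++ res.filter (fun x => !(pvExpand raw).contains x)) []).filter
          (fun x => !s.contains x) := by
  induction ts generalizing s with
  | nil => simp [PySem.Set.update]
  | cons t ts ih =>
    simp only [List.flatMap_cons, List.foldr_cons]
    have hsplit : PySem.Set.update s (pvExpand t ++ ts.flatMap pvExpand)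
        = PySem.Set.update (PySem.Set.update s (pvExpand t)) (ts.flatMap pvExpand) := by
      simp [PySem.Set.update, List.foldl_append]
    have hBC : ∀ (l : List String),
        l.filter (fun x => !((s ++ (pvExpand t).filter (fun x => !s.contains x)).contains x))
          = (l.filter (fun x => !(pvExpand t).contains x)).filter (fun x => !s.contains x) := by
      intro l
      rw [List.filter_filter]
      apply List.filter_congr
      intro x _
      by_cases hxE : x ∈ pvExpand t <;> by_cases hxs : x ∈ s <;> simp [hxE, hxs]
    rw [hsplit, pvUpdate_nodup _ s (pvExpand_nodup t), ih, hBC,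
        List.filter_append, List.append_assoc]

theorem pvBFold_eq (ts : List String) :
    ts.foldr (fun x y => pvBStep y x) ([] : List String)
      = ts.foldr (fun raw res => pvExpand raw ++ res.filter (fun x => !(pvExpand raw).contains x)) [] := by
  have hf : (fun (x : String) (y : List String) => pvBStep y x)
      = fun raw res => pvExpand raw ++ res.filter (fun x => !(pvExpand raw).contains x) := by
    funext raw res
    exact pvBStep_eq_merge res raw
  rw [hf]

-- ===== VERDICT =====
theorem expand_subjects_for_schedule_lookup_spec : Claim_equal_expand_subjects_for_schedule_lookup := by
  intro ts _
  show _ = _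
  unfold expand_subjects_for_schedule_lookup expand_subjects_for_schedule_lookup_alt
  rw [show (([], PySem.Set.empty) : List String × PySem.Set String) = (([], []) : List String × PySem.Set String) from rfl]
  rw [pvLoop_eq]
  rw [List.foldl_reverse]
  rw [pvBFold_eq]
  have hk := pvKey ts []
  simp only [List.nil_append] at hk
  rw [hk]
  simp
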